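-- pv_equiv track=rewrite | github.com/baolongsun/Jianzhioffer | huawei/K-优雅数组-双指针.py | result
-- ===== SOURCE A (Python) =====
-- def result(n,k,arr):
--     ans = 0
--     for i in range(n):
--         count = {}
--         for j in range(i, n):
--             c = arr[j]
--             if count.get(c) is None:
--                 count[c] = 1
--             else:
--                 count[c] += 1
--             if count[c]>=k:
--                 ans += n-j
--                 break
--     return ans
-- ===== SOURCE B (Python) =====
-- def result(n, k, arr):
--     # Two pointers: for each right end r, maintain the smallest window start l
--     # such that no element occurs >= k times in arr[l..r]; then exactly the
--     # starts 0..l-1 give a subarray ending at r with some element >= k times.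
--     kk = max(k, 1)  # any k < 1 is satisfied by every non-empty subarray, same as k == 1
--     cnt = {}
--     ans = 0
--     l = 0
--     for r in range(n):
--         x = arr[r]
--         cnt[x] = cnt.get(x, 0) + 1
--         while cnt[x] >= kk:
--             y = arr[l]
--             cnt[y] -= 1
--             l += 1
--         ans += l
--     return ans
-- ===== Notes on version B (the rewrite author's own statement) =====
-- stated objective: faster
-- what changed: Replaced the per-start rescan with empty dict (O(n^2)) by a single two-pointer sweep that maintains incremental frequency counts of the current window and, for each right end, the minimal start whose window has no element occurring >= k times.
import Mathlib
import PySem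

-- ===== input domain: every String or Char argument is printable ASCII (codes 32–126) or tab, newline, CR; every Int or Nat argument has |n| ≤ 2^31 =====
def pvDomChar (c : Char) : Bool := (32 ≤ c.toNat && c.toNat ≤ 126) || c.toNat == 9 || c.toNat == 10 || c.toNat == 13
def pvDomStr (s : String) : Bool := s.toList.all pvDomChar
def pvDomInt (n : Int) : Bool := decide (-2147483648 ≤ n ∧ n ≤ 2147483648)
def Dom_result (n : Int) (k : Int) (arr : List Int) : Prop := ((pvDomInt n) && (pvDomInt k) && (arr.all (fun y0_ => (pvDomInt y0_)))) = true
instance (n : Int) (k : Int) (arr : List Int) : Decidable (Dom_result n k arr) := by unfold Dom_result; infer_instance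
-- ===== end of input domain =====

-- B replaces A's O(n^2) per-start rescan by a single O(n) two-pointer sweep with
-- incremental frequency counts (objective: faster, asymptotic).

-- ===== PORT A =====
-- inner 'for j in range(i, n)' loop of A, with its break: returns the contribution added to ans
def resultInnerA (n k : Int) (arr : List Int) : List Int → PySem.Dict Int Int → Int
  | [], _ => 0
  | j :: js, count =>
    match PySem.List.pyGet? arr j with
    | none => 0   -- Python raises IndexError here; excluded by Pre_result
    | some c =>
      let count' := if (count.get? c).isNone then count.insert c 1 else count.modify c 0 (· + 1)
      if k ≤ count'.getD c 0 then n - j else resultInnerA n k arr js count'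

def result (n : Int) (k : Int) (arr : List Int) : Int :=
  (PySem.List.pyRange 0 n 1).foldl
    (fun ans i => ans + resultInnerA n k arr (PySem.List.pyRange i n 1) PySem.Dict.empty) 0

-- ===== PORT B =====
-- the 'while cnt[x] >= kk' shrink loop of B
def shrinkB (kk x : Int) (arr : List Int) (cnt : PySem.Dict Int Int) (l : Int) :
    PySem.Dict Int Int × Int :=
  if kk ≤ cnt.getD x 0 then
    match h : PySem.List.pyGet? arr l with
    | none => (cnt, l)   -- Python raises IndexError here; unreachable under Pre_result
    | some y => shrinkB kk x arr (cnt.modify y 0 (· - 1)) (l + 1)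
  else (cnt, l)
termination_by ((arr.length : Int) - l).toNat
decreasing_by
  have hn : PySem.List.pyGet? arr l ≠ none := by simp [h]
  have hin : PySem.Raise.InRange arr.length l := by
    by_contra hc
    exact hn ((PySem.List.pyGet?_eq_none_iff arr l).mpr hc)
  simp [PySem.Raise.InRange] at hin
  omega

def result_alt (n : Int) (k : Int) (arr : List Int) : Int :=
  let kk := max k 1
  let s := (PySem.List.pyRange 0 n 1).foldl
    (fun (st : PySem.Dict Int Int × Int × Int) r =>
      match PySem.List.pyGet? arr r with
      | none => st   -- Python raises IndexError here; unreachable under Pre_result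
      | some x =>
        let cnt := st.1.insert x (st.1.getD x 0 + 1)
        let p := shrinkB kk x arr cnt st.2.1
        (p.1, p.2, st.2.2 + p.2))
    (PySem.Dict.empty, 0, 0)
  s.2.2

-- ===== PRECONDITION & SPEC =====
-- A raises IndexError (arr[j] with j beyond the list) exactly when n > len(arr); Pre_ excludes those inputs.
def Pre_result (n : Int) (k : Int) (arr : List Int) : Prop := n ≤ (arr.length : Int)
instance (n : Int) (k : Int) (arr : List Int) : Decidable (Pre_result n k arr) := by
  unfold Pre_result; infer_instance

def pvWitness_result : Int × Int × List Int := (4, 2, [1, 2, 1, 2])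

def Spec_result (n : Int) (k : Int) (arr : List Int) (out : Int) : Prop := out = result_alt n k arr
instance (n : Int) (k : Int) (arr : List Int) (out : Int) : Decidable (Spec_result n k arr out) := by
  unfold Spec_result; infer_instance

-- ===== CLAIM (what is proved, stated in full; the proofs are below) =====
def Claim_equal_result : Prop := ∀ (n : Int) (k : Int) (arr : List Int),
  Dom_result n k arr → Pre_result n k arr → Spec_result n k arr (result n k arr)

-- ===== LEMMAS AND PROOFS =====

-- window arr[i..j) as a list
def Wnd (a : List Int) (i j : Nat) : List Int := (a.drop i).take (j - i)

-- "some element occurs ≥ K times in arr[i..j]" (closed right end j)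
def goodb (K : Nat) (a : List Int) (i j : Nat) : Bool :=
  (Wnd a i (j+1)).any (fun c => decide (K ≤ (Wnd a i (j+1)).count c))

lemma Wnd_nil (a : List Int) (i j : Nat) (h : j ≤ i) : Wnd a i j = [] := by
  simp [Wnd, Nat.sub_eq_zero_of_le h]

lemma Wnd_append (a : List Int) (l i j : Nat) (h1 : l ≤ i) (h2 : i ≤ j) :
    Wnd a l j = Wnd a l i ++ Wnd a i j := by
  have : j - l = (i - l) + (j - i) := by omega
  rw [Wnd, this, List.take_add]
  simp only [Wnd, List.drop_drop]
  congr 3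
  omega

lemma Wnd_succ_right (a : List Int) (i j : Nat) (hij : i ≤ j) (hj : j < a.length) :
    Wnd a i (j+1) = Wnd a i j ++ [a[j]] := by
  rw [Wnd_append a i j (j+1) hij (by omega)]
  congr 1
  have hlt : j - j < (a.drop j).length := by simp; omega
  simp [Wnd, List.take_add_one, List.getElem?_drop]

lemma Wnd_cons_left (a : List Int) (i j : Nat) (hij : i < j) (hi : i < a.length) :
    Wnd a i j = a[i] :: Wnd a (i+1) j := by
  rw [Wnd_append a i (i+1) j (by omega) (by omega)]
  have : Wnd a i (i+1) = [a[i]] := by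
    simp [Wnd, List.take_add_one, List.take_zero, List.getElem?_drop]
  simp [this]

lemma count_Wnd_mono_right (a : List Int) (i : Nat) {j j' : Nat} (h : j ≤ j') (c : Int) :
    (Wnd a i j).count c ≤ (Wnd a i j').count c := by
  rcases Nat.le_total j i with hji | hij
  · simp [Wnd_nil a i j hji]
  · rw [Wnd_append a i j j' hij h]
    simp [List.count_append]

lemma count_Wnd_mono_left (a : List Int) {i i' : Nat} (j : Nat) (h : i ≤ i') (c : Int) :
    (Wnd a i' j).count c ≤ (Wnd a i j).count c := by
  rcases Nat.le_total j i' with hji | hij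
  · simp [Wnd_nil a i' j hji]
  · rw [Wnd_append a i i' j h hij]
    simp [List.count_append]

lemma goodb_mono_right (K : Nat) (a : List Int) (i : Nat) {j j' : Nat} (h : j ≤ j')
    (hg : goodb K a i j = true) : goodb K a i j' = true := by
  simp only [goodb, List.any_eq_true, decide_eq_true_eq] at hg ⊢
  obtain ⟨c, hc, hK⟩ := hg
  refine ⟨c, ?_, le_trans hK (count_Wnd_mono_right a i (by omega) c)⟩
  have : (Wnd a i (j+1)).count c ≤ (Wnd a i (j'+1)).count c :=
    count_Wnd_mono_right a i (by omega) c
  have hpos : 0 < (Wnd a i (j'+1)).count c := by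
    have := List.count_pos_iff.mpr hc; omega
  exact List.count_pos_iff.mp hpos

lemma goodb_mono_left (K : Nat) (a : List Int) {i i' : Nat} (j : Nat) (h : i ≤ i')
    (hg : goodb K a i' j = true) : goodb K a i j = true := by
  simp only [goodb, List.any_eq_true, decide_eq_true_eq] at hg ⊢
  obtain ⟨c, hc, hK⟩ := hg
  refine ⟨c, ?_, le_trans hK (count_Wnd_mono_left a (j+1) h c)⟩
  have hpos : 0 < (Wnd a i (j+1)).count c := by
    have h1 := List.count_pos_iff.mpr hc
    have := count_Wnd_mono_left a (j+1) h c; omega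
  exact List.count_pos_iff.mp hpos

-- the break condition of A at step j, given no earlier break, is exactly goodb at j
lemma goodb_iff_trigger (K : Nat) (hK : 1 ≤ K) (a : List Int) (i j : Nat) (hij : i ≤ j)
    (hj : j < a.length)
    (hprev : ∀ j', i ≤ j' → j' < j → goodb K a i j' = false) :
    goodb K a i j = true ↔ K ≤ (Wnd a i (j+1)).count a[j] := by
  constructor
  · intro hg
    simp only [goodb, List.any_eq_true, decide_eq_true_eq] at hg
    obtain ⟨c, hc, hKc⟩ := hg
    by_cases hcx : c = a[j]
    · rwa [hcx] at hKc
    · exfalso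
      have hsplit : (Wnd a i (j+1)).count c = (Wnd a i j).count c := by
        have hne : a[j] ≠ c := fun h => hcx h.symm
        rw [Wnd_succ_right a i j hij hj, List.count_append]
        simp [hne]
      rcases Nat.eq_or_lt_of_le hij with rfl | hlt
      · have : Wnd a i i = [] := Wnd_nil a i i le_rfl
        rw [hsplit, this] at hKc; simp at hKc; omega
      · have hji : i ≤ j - 1 := by omega
        have hfalse := hprev (j-1) hji (by omega)
        have : goodb K a i (j-1) = true := by
          simp only [goodb, List.any_eq_true, decide_eq_true_eq]
          have hj1 : j - 1 + 1 = j := by omega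
          refine ⟨c, ?_, by rw [hj1]; omega⟩
          rw [hj1]
          have : 0 < (Wnd a i j).count c := by omega
          exact List.count_pos_iff.mp this
        rw [this] at hfalse; exact absurd hfalse (by simp)
  · intro hKc
    simp only [goodb, List.any_eq_true, decide_eq_true_eq]
    refine ⟨a[j], ?_, hKc⟩
    have : 0 < (Wnd a i (j+1)).count a[j] := by omega
    exact List.count_pos_iff.mp this

-- k ≤ v (Int) with v = count ≥ 1 is K ≤ count with K = (max k 1).toNat
lemma trigger_int_iff (k : Int) (K : Nat) (hK : K = (max k 1).toNat) (cnt : Nat) (h1 : 1 ≤ cnt) :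
    (k ≤ (cnt : Int)) ↔ K ≤ cnt := by
  by_cases hk : k ≤ 1
  · constructor
    · intro _; omega
    · intro _; exact le_trans hk (by exact_mod_cast h1)
  · omega

-- A's inner loop computes the number of good right ends in [j, m)
lemma innerA_eq (n k : Int) (a : List Int) (K m : Nat)
    (hK : K = (max k 1).toNat) (hm : (m : Int) = n) (hlen : m ≤ a.length) :
    ∀ (t j : Nat) (i : Nat) (d : PySem.Dict Int Int), t = m - j → i ≤ j → j ≤ m →
    (∀ c, d.getD c 0 = ((Wnd a i j).count c : Int)) →
    (∀ j', i ≤ j' → j' < j → goodb K a i j' = false) →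
    resultInnerA n k a (PySem.List.pyRange (j : Int) n 1) d
      = (((Finset.Ico j m).filter (fun j' => goodb K a i j')).card : Int) := by
  intro t
  induction t with
  | zero =>
    intro j i d ht hij hjm hd hprev
    have hjeq : j = m := by omega
    subst hjeq
    rw [show ((j : Nat) : Int) = n from by rw [← hm]]
    rw [PySem.List.pyRange_one_eq_nil le_rfl]
    simp [resultInnerA]
  | succ t ih =>
    intro j i d ht hij hjm hd hprev
    have hjm2 : j < m := by omega
    have hjn : (j : Int) < n := by rw [← hm]; exact_mod_cast hjm2
    have hjlen : j < a.length := lt_of_lt_of_le hjm2 hlen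
    rw [PySem.List.pyRange_one_cons hjn]
    have hget : PySem.List.pyGet? a (j : Int) = some a[j] := by
      rw [PySem.List.pyGet?_natCast, List.getElem?_eq_getElem hjlen]
    simp only [resultInnerA, hget]
    set c := a[j] with hc
    -- the updated dict counts the window extended by a[j]
    have hcount_succ : ∀ x : Int, (Wnd a i (j+1)).count x
        = (Wnd a i j).count x + (if x = c then 1 else 0) := by
      intro x
      rw [Wnd_succ_right a i j hij hjlen, List.count_append]
      by_cases hxc : x = c
      · simp [hxc, hc]
      · have hne : c ≠ x := fun h => hxc h.symm
        simp [hxc]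
        exact List.count_eq_zero.mpr (by simp [← hc]; exact hxc)
    set d' := (if (d.get? c).isNone then d.insert c 1 else d.modify c 0 (· + 1)) with hd'def
    have hd' : ∀ x, d'.getD x 0 = ((Wnd a i (j+1)).count x : Int) := by
      intro x
      rw [hd'def]
      by_cases hnone : (d.get? c).isNone
      · rw [if_pos hnone]
        have h0 : d.getD c 0 = 0 := PySem.Dict.getD_of_get?_eq_none d 0 (Option.isNone_iff_eq_none.mp hnone)
        have hc0 : ((Wnd a i j).count c : Int) = 0 := by rw [← hd c, h0]
        rw [PySem.Dict.getD_insert, hcount_succ x]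
        by_cases hxc : x = c
        · simp [hxc]; omega
        · simp [hxc, hd x]
      · rw [if_neg hnone]
        rw [PySem.Dict.getD_modify, hcount_succ x]
        by_cases hxc : x = c
        · simp [hxc, hd c]
        · simp [hxc, hd x]
    have hcpos : 1 ≤ (Wnd a i (j+1)).count c := by
      rw [hcount_succ c]; simp
    have htrig : (k ≤ d'.getD c 0) ↔ (K ≤ (Wnd a i (j+1)).count c) := by
      rw [hd' c]
      exact trigger_int_iff k K hK _ hcpos
    have hgood_iff := goodb_iff_trigger K (by omega) a i j hij hjlen hprev
    split_ifs with htest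
    · -- break: everything from j on is good
      have hgj : goodb K a i j = true := hgood_iff.mpr (htrig.mp htest)
      have hall : ∀ j' ∈ Finset.Ico j m, goodb K a i j' = true := by
        intro j' hj'
        simp only [Finset.mem_Ico] at hj'
        exact goodb_mono_right K a i hj'.1 hgj
      rw [Finset.filter_true_of_mem hall, Nat.card_Ico]
      have : ((m - j : Nat) : Int) = n - j := by omega
      rw [this]
    · -- no break at j: recurse
      have hgj : goodb K a i j = false := by
        rcases Bool.eq_false_or_eq_true (goodb K a i j) with h | h
        · exact absurd (htrig.mpr (hgood_iff.mp h)) htest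
        · exact h
      have hstep : ((j : Int) + 1) = ((j + 1 : Nat) : Int) := by push_cast; ring
      rw [hstep, ih (j+1) i _ (by omega) (by omega) (by omega) hd'
        (by
          intro j' hij' hj'
          rcases Nat.lt_succ_iff_lt_or_eq.mp hj' with h | h
          · exact hprev j' hij' h
          · rw [h]; exact hgj)]
      have hIco : Finset.Ico j m = insert j (Finset.Ico (j+1) m) :=
        (Finset.insert_Ico_add_one_left_eq_Ico hjm2).symm
      rw [hIco, Finset.filter_insert, if_neg (by simp [hgj])]

-- B's shrink loop: advances l to the minimal start whose window has all counts < K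
lemma shrinkB_spec (kk : Int) (K : Nat) (hkk : kk = (K : Int)) (hK1 : 1 ≤ K)
    (a : List Int) (r : Nat) (hr : r < a.length) (x : Int) (hx : x = a[r]) :
    ∀ (t l : Nat) (cnt : PySem.Dict Int Int), t = r + 1 - l → l ≤ r + 1 →
    (∀ c, cnt.getD c 0 = ((Wnd a l (r+1)).count c : Int)) →
    (∀ c, c ≠ x → (Wnd a l (r+1)).count c < K) →
    ∃ (l' : Nat) (cnt' : PySem.Dict Int Int),
      shrinkB kk x a cnt (l : Int) = (cnt', (l' : Int)) ∧ l ≤ l' ∧ l' ≤ r + 1 ∧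
      (∀ c, cnt'.getD c 0 = ((Wnd a l' (r+1)).count c : Int)) ∧
      (∀ c, (Wnd a l' (r+1)).count c < K) ∧
      (∀ i, l ≤ i → i < l' → goodb K a i r = true) := by
  intro t
  induction t with
  | zero =>
    intro l cnt ht hl hcnt hlt
    have hl' : l = r + 1 := by omega
    rw [shrinkB]
    have hx0 : cnt.getD x 0 = 0 := by
      rw [hcnt x, hl', Wnd_nil a (r+1) (r+1) le_rfl]; simp
    have hng : ¬ kk ≤ cnt.getD x 0 := by rw [hx0, hkk]; omega
    rw [if_neg hng]
    refine ⟨l, cnt, rfl, le_rfl, hl, hcnt, ?_,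
      fun i h1 h2 => absurd (h1.trans_lt h2) (lt_irrefl l)⟩
    intro c
    rw [hl', Wnd_nil a (r+1) (r+1) le_rfl]
    simpa using hK1
  | succ t ih =>
    intro l cnt ht hl hcnt hlt
    rw [shrinkB]
    by_cases hg : kk ≤ cnt.getD x 0
    · -- the guard holds: remove a[l] and recurse
      have hxK : K ≤ (Wnd a l (r+1)).count x := by
        have h1 := hcnt x
        rw [hkk, h1] at hg
        exact_mod_cast hg
      have hlr : l ≤ r := by omega
      have hllen : l < a.length := by omega
      have hget : PySem.List.pyGet? a (l : Int) = some a[l] := by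
        rw [PySem.List.pyGet?_natCast, List.getElem?_eq_getElem hllen]
      rw [if_pos hg]
      split
      · next heq => rw [hget] at heq; exact absurd heq (by simp)
      · next y heq =>
        rw [hget] at heq
        injection heq with hy
        subst hy
        have hcons : Wnd a l (r+1) = a[l] :: Wnd a (l+1) (r+1) :=
          Wnd_cons_left a l (r+1) (by omega) hllen
        have hcnt2 : ∀ c, (cnt.modify a[l] 0 (· - 1)).getD c 0
            = ((Wnd a (l+1) (r+1)).count c : Int) := by
          intro c
          rw [PySem.Dict.getD_modify]
          by_cases hca : c = a[l]
          · rw [if_pos hca, hcnt a[l], hcons, hca]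
            simp
          · rw [if_neg hca, hcnt c]
            rw [hcons]
            have : a[l] ≠ c := fun h => hca h.symm
            simp [this]
        have hlt2 : ∀ c, c ≠ x → (Wnd a (l+1) (r+1)).count c < K := by
          intro c hcx
          exact lt_of_le_of_lt (count_Wnd_mono_left a (r+1) (by omega) c) (hlt c hcx)
        obtain ⟨l', cnt', heq', hle', hle'', hc', hsm', hgd'⟩ :=
          ih (l+1) (cnt.modify a[l] 0 (· - 1)) (by omega) (by omega) hcnt2 hlt2
        have hcast : (l : Int) + 1 = ((l + 1 : Nat) : Int) := by push_cast; ring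
        rw [hcast, heq']
        refine ⟨l', cnt', rfl, by omega, hle'', hc', hsm', ?_⟩
        intro i hli hil'
        rcases Nat.eq_or_lt_of_le hli with rfl | hlt3
        · -- window [l..r] itself is good, witnessed by x
          simp only [goodb, List.any_eq_true, decide_eq_true_eq]
          refine ⟨x, ?_, hxK⟩
          exact List.count_pos_iff.mp (by omega)
        · exact hgd' i (by omega) hil'
    · -- guard fails: stop here; all counts are < K
      rw [if_neg hg]
      refine ⟨l, cnt, rfl, le_rfl, hl, hcnt, ?_,
        fun i h1 h2 => absurd (h1.trans_lt h2) (lt_irrefl l)⟩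
      intro c
      by_cases hcx : c = x
      · subst hcx
        have := hcnt c
        rw [hkk] at hg
        omega
      · exact hlt c hcx

-- B's outer loop invariant
lemma outerB_eq (n k kk : Int) (a : List Int) (K m : Nat)
    (hkk : kk = max k 1) (hK : K = (max k 1).toNat) (hm : (m : Int) = n) (hlen : m ≤ a.length) :
    ∀ (t r l : Nat) (cnt : PySem.Dict Int Int) (ans : Int), t = m - r → r ≤ m → l ≤ r →
    (∀ c, cnt.getD c 0 = ((Wnd a l r).count c : Int)) →
    (∀ c, (Wnd a l r).count c < K) →
    (∀ i, i < l → goodb K a i (r-1) = true) →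
    ((PySem.List.pyRange (r : Int) n 1).foldl
      (fun (st : PySem.Dict Int Int × Int × Int) j =>
        match PySem.List.pyGet? a j with
        | none => st
        | some x =>
          let cnt := st.1.insert x (st.1.getD x 0 + 1)
          let p := shrinkB kk x a cnt st.2.1
          (p.1, p.2, st.2.2 + p.2))
      (cnt, (l : Int), ans)).2.2
      = ans + ∑ r' ∈ Finset.Ico r m, (((Finset.range (r'+1)).filter (fun i => goodb K a i r')).card : Int) := by
  have hkk' : kk = (K : Int) := by
    rw [hkk, hK]
    have h1 : (1 : Int) ≤ max k 1 := le_max_right k 1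
    omega
  have hK1 : 1 ≤ K := by
    rw [hK]
    have h1 : (1 : Int) ≤ max k 1 := le_max_right k 1
    omega
  intro t
  induction t with
  | zero =>
    intro r l cnt ans ht hrm hlr hcnt hsm hgood
    have hreq : r = m := by omega
    subst hreq
    rw [show ((r : Nat) : Int) = n from by rw [← hm]]
    rw [PySem.List.pyRange_one_eq_nil le_rfl]
    simp
  | succ t ih =>
    intro r l cnt ans ht hrm hlr hcnt hsm hgood
    have hrm2 : r < m := by omega
    have hrlen : r < a.length := lt_of_lt_of_le hrm2 hlen
    have hrn : (r : Int) < n := by rw [← hm]; exact_mod_cast hrm2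
    rw [PySem.List.pyRange_one_cons hrn, List.foldl_cons]
    have hget : PySem.List.pyGet? a (r : Int) = some a[r] := by
      rw [PySem.List.pyGet?_natCast, List.getElem?_eq_getElem hrlen]
    simp only [hget]
    have hsucc : Wnd a l (r+1) = Wnd a l r ++ [a[r]] := Wnd_succ_right a l r hlr hrlen
    have hcnt2 : ∀ c, (cnt.insert a[r] (cnt.getD a[r] 0 + 1)).getD c 0
        = ((Wnd a l (r+1)).count c : Int) := by
      intro c
      rw [PySem.Dict.getD_insert, hsucc, List.count_append]
      by_cases hca : c = a[r]
      · rw [if_pos hca, hcnt a[r], hca]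
        simp
      · rw [if_neg hca, hcnt c]
        have : a[r] ≠ c := fun h => hca h.symm
        simp [this]
    have hlt2 : ∀ c, c ≠ a[r] → (Wnd a l (r+1)).count c < K := by
      intro c hca
      rw [hsucc, List.count_append]
      have : a[r] ≠ c := fun h => hca h.symm
      simpa [List.count_singleton, this] using hsm c
    obtain ⟨l', cnt', heq, hll', hl'r, hc', hsm', hgd'⟩ :=
      shrinkB_spec kk K hkk' hK1 a r hrlen a[r] rfl (r + 1 - l) l
        (cnt.insert a[r] (cnt.getD a[r] 0 + 1)) rfl (by omega) hcnt2 hlt2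
    simp only [heq]
    have hall : ∀ i, i < l' → goodb K a i r = true := by
      intro i hi
      by_cases hil : i < l
      · have h1 := hgood i hil
        exact goodb_mono_right K a i (by omega) h1
      · exact hgd' i (by omega) hi
    have hrec := ih (r+1) l' cnt' (ans + (l' : Int)) (by omega) (by omega) hl'r hc' hsm'
      (by intro i hi; simpa using hall i hi)
    have hcast : ((r : Int) + 1) = ((r + 1 : Nat) : Int) := by push_cast; ring
    rw [hcast]
    rw [hrec]
    have hcol : (Finset.range (r+1)).filter (fun i => goodb K a i r) = Finset.range l' := by
      ext i
      simp only [Finset.mem_filter, Finset.mem_range, Nat.lt_succ_iff]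
      constructor
      · rintro ⟨hir, hgi⟩
        by_contra hc
        push Not at hc
        have hgl' : goodb K a l' r = true := goodb_mono_left K a r hc hgi
        simp only [goodb, List.any_eq_true, decide_eq_true_eq] at hgl'
        obtain ⟨c, _, hKc⟩ := hgl'
        exact absurd hKc (by have := hsm' c; omega)
      · intro hi
        exact ⟨by omega, hall i hi⟩
    rw [Finset.sum_eq_sum_Ico_succ_bot hrm2, hcol, Finset.card_range]
    ring

-- double counting: per-start tallies = per-end tallies
lemma double_count (m : Nat) (g : Nat → Nat → Bool) :
    ∑ i ∈ Finset.range m, (((Finset.Ico i m).filter (fun j => g i j)).card : Int)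
      = ∑ r ∈ Finset.range m, (((Finset.range (r+1)).filter (fun i => g i r)).card : Int) := by
  have e1 : ∀ i, (Finset.Ico i m).filter (fun j => g i j)
      = (Finset.range m).filter (fun j => i ≤ j ∧ g i j) := by
    intro i; ext j
    simp only [Finset.mem_filter, Finset.mem_Ico, Finset.mem_range]
    tauto
  have e2 : ∀ r ∈ Finset.range m, (((Finset.range (r+1)).filter (fun i => g i r)).card : Int)
      = (((Finset.range m).filter (fun i => i ≤ r ∧ g i r)).card : Int) := by
    intro r hr
    simp only [Finset.mem_range] at hr
    have h : (Finset.range (r+1)).filter (fun i => g i r)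
        = (Finset.range m).filter (fun i => i ≤ r ∧ g i r) := by
      ext i
      simp only [Finset.mem_filter, Finset.mem_range, Nat.lt_succ_iff]
      constructor
      · rintro ⟨h1, h2⟩; exact ⟨by omega, h1, h2⟩
      · rintro ⟨_, h1, h2⟩; exact ⟨h1, h2⟩
    rw [h]
  rw [Finset.sum_congr rfl e2]
  simp only [e1, Finset.card_filter]
  push_cast
  rw [Finset.sum_comm]

-- A's value, under Pre_, is the per-start tally of good right ends
lemma result_eq_rows (n k : Int) (arr : List Int) (K m : Nat)
    (hK : K = (max k 1).toNat) (hm : (m : Int) = n) (hlen : m ≤ arr.length) :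
    result n k arr
      = ∑ i ∈ Finset.range m, (((Finset.Ico i m).filter (fun j => goodb K arr i j)).card : Int) := by
  unfold result
  rw [PySem.List.foldl_add]
  rw [show PySem.List.pyRange 0 n 1 = (List.range m).map (fun i : Nat => (i : Int)) from by
    rw [← hm]; exact PySem.List.pyRange_zero_natCast m]
  rw [List.map_map]
  simp only [Function.comp_def]
  have hmap : ∀ i ∈ List.range m,
      resultInnerA n k arr (PySem.List.pyRange ((i : Nat) : Int) n 1) PySem.Dict.empty
        = (((Finset.Ico i m).filter (fun j => goodb K arr i j)).card : Int) := by
    intro i hi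
    exact innerA_eq n k arr K m hK hm hlen (m - i) i i PySem.Dict.empty rfl le_rfl
      (le_of_lt (List.mem_range.mp hi))
      (by intro c; rw [PySem.Dict.getD_empty, Wnd_nil arr i i le_rfl]; simp)
      (fun j' h1 h2 => absurd (h1.trans_lt h2) (lt_irrefl i))
  rw [List.map_congr_left hmap]
  rw [zero_add]
  rfl

-- B's value, under Pre_, is the per-end tally of good starts
lemma result_alt_eq_cols (n k : Int) (arr : List Int) (K m : Nat)
    (hK : K = (max k 1).toNat) (hm : (m : Int) = n) (hlen : m ≤ arr.length) :
    result_alt n k arr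
      = ∑ r ∈ Finset.Ico 0 m, (((Finset.range (r+1)).filter (fun i => goodb K arr i r)).card : Int) := by
  have hK1 : 1 ≤ K := by
    rw [hK]
    have h1 : (1 : Int) ≤ max k 1 := le_max_right k 1
    omega
  unfold result_alt
  have h := outerB_eq n k (max k 1) arr K m rfl hK hm hlen m 0 0 PySem.Dict.empty 0
    rfl (by omega) le_rfl
    (by intro c; rw [PySem.Dict.getD_empty, Wnd_nil arr 0 0 le_rfl]; simp)
    (by intro c; rw [Wnd_nil arr 0 0 le_rfl]; simpa using hK1)
    (fun i hi => absurd hi (Nat.not_lt_zero i))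
  simpa using h

-- ===== VERDICT (by name: the statement is the Claim_ definition above) =====
theorem result_spec : Claim_equal_result := by
  intro n k arr _ hpre
  unfold Spec_result
  by_cases hn : n ≤ 0
  · simp [result, result_alt, PySem.List.pyRange_one_eq_nil hn]
  · push Not at hn
    have hm : ((n.toNat : Nat) : Int) = n := Int.toNat_of_nonneg (le_of_lt hn)
    have hlen : n.toNat ≤ arr.length := by
      have := hpre
      unfold Pre_result at this
      omega
    rw [result_eq_rows n k arr ((max k 1).toNat) n.toNat rfl hm hlen,
        result_alt_eq_cols n k arr ((max k 1).toNat) n.toNat rfl hm hlen,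
        ← Finset.range_eq_Ico]
    exact double_count n.toNat (goodb ((max k 1).toNat) arr)
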